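-- pv_equiv track=rewrite | github.com/PLSE-Lab/Python-MLAPI-expl | python_sources/fractional-factorial-design.py | get_basic_values
-- ===== SOURCE A (Python) =====
-- import itertools as it # permutations and combinations
--
-- def get_basic_values(basic_factors, num_runs):
--     runs = {}
--     for i, factor in enumerate(basic_factors):
--         alternate = 2**(i)
--         run = []
--         value = 1
--         while len(run) < num_runs:
--             run.extend( it.repeat(value, alternate))
--             value = value * -1
--         runs[factor] = run
--     return runs
-- ===== SOURCE B (Python) =====
-- def get_basic_values(basic_factors, num_runs):
--     runs = {}
--     for i, factor in enumerate(basic_factors):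
--         block = 2 ** i
--         if num_runs > 0:
--             total = ((num_runs + block - 1) // block) * block
--         else:
--             total = 0
--         runs[factor] = [1 if (j // block) % 2 == 0 else -1 for j in range(total)]
--     return runs
-- ===== Notes on version B (the rewrite author's own statement) =====
-- stated objective: alternative
-- what changed: Each column's (overshooting) length is computed up front by ceiling division, and each entry's sign is derived from its index via (j//block)%2, replacing the extend-blocks-until-long-enough while loop.
import Mathlib
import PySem

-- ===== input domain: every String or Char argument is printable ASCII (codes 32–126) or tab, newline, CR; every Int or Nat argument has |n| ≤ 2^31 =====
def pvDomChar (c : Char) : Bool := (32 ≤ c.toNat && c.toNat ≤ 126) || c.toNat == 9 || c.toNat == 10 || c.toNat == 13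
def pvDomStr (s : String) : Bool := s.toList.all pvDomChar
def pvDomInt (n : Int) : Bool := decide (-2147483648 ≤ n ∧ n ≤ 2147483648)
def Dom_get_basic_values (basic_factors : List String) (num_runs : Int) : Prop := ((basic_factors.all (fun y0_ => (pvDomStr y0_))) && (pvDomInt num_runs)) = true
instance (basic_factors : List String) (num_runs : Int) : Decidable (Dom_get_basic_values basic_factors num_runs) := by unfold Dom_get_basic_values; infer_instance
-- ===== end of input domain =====

-- B builds each column by computing its (overshooting) length up front and mapping each index to its
-- sign via (j // block) % 2, instead of A's extend-blocks-until-long-enough while loop (objective: alternative).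

-- ===== PORT A =====
-- the 'while len(run) < num_runs: run.extend(it.repeat(value, alternate)); value = value * -1' loop,
-- with alternate = 2^i kept as the Nat exponent i (enumerate indices are ≥ 0)
def pvLoopA (i : Nat) (num_runs : Int) (run : List Int) (value : Int) : List Int :=
  if ((run.length : Int)) < num_runs then
    pvLoopA i num_runs (run ++ List.replicate (2 ^ i) value) (value * -1)
  else run
termination_by (num_runs - run.length).toNat
decreasing_by
  have h2 : 0 < 2 ^ i := Nat.two_pow_pos i
  simp only [List.length_append, List.length_replicate]
  omega

def get_basic_values (basic_factors : List String) (num_runs : Int) : List (String × List Int) :=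
  ((PySem.List.enumerate basic_factors 0).foldl
    (fun runs p => runs.insert p.2 (pvLoopA p.1.toNat num_runs [] 1))
    (PySem.Dict.empty : PySem.Dict String (List Int))).items

-- ===== PORT B =====
-- [1 if (j // block) % 2 == 0 else -1 for j in range(total)], total computed by ceiling division
def pvAltRun (i : Nat) (num_runs : Int) : List Int :=
  let block : Int := ((2 ^ i : Nat) : Int)
  let total : Int := if 0 < num_runs then (PySem.Int.floordiv (num_runs + block - 1) block) * block else 0
  (PySem.List.pyRange 0 total 1).map
    (fun j => if PySem.Int.mod (PySem.Int.floordiv j block) 2 = 0 then 1 else -1)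

def get_basic_values_alt (basic_factors : List String) (num_runs : Int) : List (String × List Int) :=
  ((PySem.List.enumerate basic_factors 0).foldl
    (fun runs p => runs.insert p.2 (pvAltRun p.1.toNat num_runs))
    (PySem.Dict.empty : PySem.Dict String (List Int))).items

-- ===== PRECONDITION & SPEC =====
def Spec_get_basic_values (basic_factors : List String) (num_runs : Int) (out : List (String × List Int)) : Prop := out = get_basic_values_alt basic_factors num_runs
instance (basic_factors : List String) (num_runs : Int) (out : List (String × List Int)) : Decidable (Spec_get_basic_values basic_factors num_runs out) := by unfold Spec_get_basic_values; infer_instance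

-- ===== CLAIM (what is proved, stated in full; the proofs are below) =====
def Claim_equal_get_basic_values : Prop := ∀ (basic_factors : List String) (num_runs : Int), Dom_get_basic_values basic_factors num_runs → Spec_get_basic_values basic_factors num_runs (get_basic_values basic_factors num_runs)

-- ===== LEMMAS AND PROOFS =====

-- sign of block t
def pvSgn (t : Nat) : Int := if t % 2 = 0 then 1 else -1

-- first k blocks of length a, alternating sign
def pvF (a k : Nat) : List Int := (List.range k).flatMap (fun t => List.replicate a (pvSgn t))

theorem pvF_zero (a : Nat) : pvF a 0 = [] := by simp [pvF]

theorem pvF_succ (a k : Nat) : pvF a (k + 1) = pvF a k ++ List.replicate a (pvSgn k) := by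
  simp [pvF, List.range_succ]

theorem pvF_length (a k : Nat) : (pvF a k).length = k * a := by
  induction k with
  | zero => simp [pvF]
  | succ k ih => rw [pvF_succ]; simp [ih]; ring

theorem pvSgn_succ (k : Nat) : pvSgn (k + 1) = pvSgn k * -1 := by
  unfold pvSgn
  rcases Nat.mod_two_eq_zero_or_one k with h | h <;> simp [Nat.add_mod, h]

-- the number of blocks A's loop emits, starting from k blocks already present
def pvNb (i : Nat) (num_runs : Int) (k : Nat) : Nat :=
  if (((k * 2 ^ i : Nat) : Int)) < num_runs then pvNb i num_runs (k + 1) else k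
termination_by (num_runs - ((k * 2 ^ i : Nat) : Int)).toNat
decreasing_by
  have h2 : 0 < 2 ^ i := Nat.two_pow_pos i
  have h3 : (k + 1) * 2 ^ i = k * 2 ^ i + 2 ^ i := by ring
  omega

theorem pvLoopA_eq_F (i : Nat) (n : Int) (k : Nat) :
    pvLoopA i n (pvF (2 ^ i) k) (pvSgn k) = pvF (2 ^ i) (pvNb i n k) := by
  rw [pvLoopA, pvNb, pvF_length]
  split
  · rw [← pvF_succ, ← pvSgn_succ]
    exact pvLoopA_eq_F i n (k + 1)
  · rfl
termination_by (n - ((k * 2 ^ i : Nat) : Int)).toNat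
decreasing_by
  have h2 : 0 < 2 ^ i := Nat.two_pow_pos i
  have h3 : (k + 1) * 2 ^ i = k * 2 ^ i + 2 ^ i := by ring
  omega

theorem pvNb_eq_of (i : Nat) (n : Int) (k c : Nat) (hkc : k ≤ c)
    (hc : n ≤ ((c * 2 ^ i : Nat) : Int))
    (hmin : ∀ j, j < c → (((j * 2 ^ i : Nat) : Int) < n)) : pvNb i n k = c := by
  rw [pvNb]
  split
  · rename_i h
    have hkn : k ≠ c := by rintro rfl; omega
    exact pvNb_eq_of i n (k + 1) c (by omega) hc hmin
  · rename_i h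
    rcases Nat.lt_or_ge k c with hlt | _
    · exact absurd (hmin k hlt) h
    · omega
termination_by (n - ((k * 2 ^ i : Nat) : Int)).toNat
decreasing_by
  have h2 : 0 < 2 ^ i := Nat.two_pow_pos i
  have h3 : (k + 1) * 2 ^ i = k * 2 ^ i + 2 ^ i := by ring
  omega

-- B's per-index sign formula, on a natural index, is the block sign
theorem pvSign_formula (a k : Nat) :
    (if PySem.Int.mod (PySem.Int.floordiv ((k : Nat) : Int) ((a : Nat) : Int)) 2 = 0 then (1 : Int) else -1)
      = pvSgn (k / a) := by
  rw [PySem.Int.floordiv_natCast]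
  rw [PySem.Int.mod_eq_emod_of_pos (by omega)]
  have hiff : ((((k / a : Nat) : Int)) % 2 = 0) ↔ ((k / a) % 2 = 0) := by omega
  unfold pvSgn
  simp only [hiff]

theorem pvMapRange_eq_F (a m : Nat) (ha : 0 < a) :
    (List.range (m * a)).map (fun k => pvSgn (k / a)) = pvF a m := by
  induction m with
  | zero => simp [pvF]
  | succ m ih =>
    have h1 : (m + 1) * a = m * a + a := by ring
    rw [h1, List.range_add, List.map_append, ih, pvF_succ]
    congr 1
    rw [List.map_map]
    have h2 : ∀ k ∈ List.range a, ((fun k => pvSgn (k / a)) ∘ fun x => m * a + x) k = pvSgn m := by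
      intro k hk
      have hk' : k < a := List.mem_range.mp hk
      have hdiv : (m * a + k) / a = m := by
        rw [Nat.add_comm, Nat.add_mul_div_right k m ha, Nat.div_eq_of_lt hk']; omega
      simp only [Function.comp_apply, hdiv]
    rw [List.map_congr_left h2]
    simp [List.map_const']

-- main per-column lemma: A's loop equals B's index map
theorem pvRun_eq (i : Nat) (n : Int) : pvLoopA i n [] 1 = pvAltRun i n := by
  have hstart : pvLoopA i n [] 1 = pvF (2 ^ i) (pvNb i n 0) := by
    have := pvLoopA_eq_F i n 0
    rwa [pvF_zero, pvSgn] at this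
  unfold pvAltRun
  simp only
  by_cases hn : 0 < n
  · simp only [if_pos hn]
    have hApos : (0 : Int) < ((2 ^ i : Nat) : Int) := by exact_mod_cast Nat.two_pow_pos i
    set c := PySem.Int.floordiv (n + ((2 ^ i : Nat) : Int) - 1) ((2 ^ i : Nat) : Int) with hc
    obtain ⟨h1, h2⟩ := (PySem.Int.floordiv_eq_iff_of_pos hApos
      (a := n + ((2 ^ i : Nat) : Int) - 1) (q := c)).mp hc.symm
    have e1 : (c + 1) * ((2 ^ i : Nat) : Int) = c * ((2 ^ i : Nat) : Int) + ((2 ^ i : Nat) : Int) := by ring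
    have hcA : n ≤ c * ((2 ^ i : Nat) : Int) := by linarith
    have hcpos : 0 < c := by nlinarith
    have hm : ((c.toNat : Nat) : Int) = c := Int.toNat_of_nonneg (by omega)
    have htot : c * ((2 ^ i : Nat) : Int) = (((c.toNat * 2 ^ i : Nat) : Int)) := by
      rw [Nat.cast_mul, hm]
    have hnb : pvNb i n 0 = c.toNat := by
      apply pvNb_eq_of i n 0 c.toNat (by omega)
      · rw [← htot]; exact hcA
      · intro j hj
        have hj' : ((j : Nat) : Int) ≤ c - 1 := by omega
        have hcast : ((j * 2 ^ i : Nat) : Int) = ((j : Nat) : Int) * ((2 ^ i : Nat) : Int) :=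
          Nat.cast_mul j (2 ^ i)
        rw [hcast]
        have hle : ((j : Nat) : Int) * ((2 ^ i : Nat) : Int) ≤ (c - 1) * ((2 ^ i : Nat) : Int) :=
          mul_le_mul_of_nonneg_right hj' (by omega)
        have e2 : (c - 1) * ((2 ^ i : Nat) : Int) = c * ((2 ^ i : Nat) : Int) - ((2 ^ i : Nat) : Int) := by ring
        linarith
    rw [hstart, hnb, htot, PySem.List.pyRange_zero_natCast, List.map_map]
    rw [← pvMapRange_eq_F (2 ^ i) c.toNat (Nat.two_pow_pos i)]
    apply List.map_congr_left
    intro k _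
    simp only [Function.comp_apply]
    exact (pvSign_formula (2 ^ i) k).symm
  · simp only [if_neg hn]
    have hnb : pvNb i n 0 = 0 := by
      rw [pvNb]
      simp only [Nat.zero_mul, Nat.cast_zero]
      rw [if_neg (by omega)]
    rw [hstart, hnb, pvF_zero, PySem.List.pyRange_one_eq_nil (le_refl (0 : Int))]
    simp

-- ===== VERDICT (by name: the statement is the Claim_ definition above) =====
theorem get_basic_values_spec : Claim_equal_get_basic_values := by
  intro basic_factors num_runs _
  unfold Spec_get_basic_values get_basic_values get_basic_values_alt
  congr 1
  congr 1
  funext runs p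
  rw [pvRun_eq]
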